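-- pv_equiv track=rewrite | github.com/fleximeter/mutil | programs/pcset_calculator.py | validate_transformation
-- ===== SOURCE A (Python) =====
-- NON_NUMERIC_TRANSFORMATIONS = {"I"}
--
-- NUMERIC_TRANSFORMATIONS = {"T", "M"}
--
-- VALID_TRANSFORMATIONS = NUMERIC_TRANSFORMATIONS.union(NON_NUMERIC_TRANSFORMATIONS)
--
-- def validate_transformation(transformation: str) -> bool:
--     """
--     Validates a transformation
--     :param transformation: The transformation string
--     :return: True or False
--     """
--     transformation = transformation.strip()
--     for i, c in enumerate(transformation):
--         # check for invalid characters
--         if c not in VALID_TRANSFORMATIONS and not '0' <= c <= '9':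
--             return False
--
--         # check for numbers being given to transformations that can't take them
--         elif i < len(transformation) - 1 and c in NON_NUMERIC_TRANSFORMATIONS and '0' <= transformation[i+1] <= '9':
--             return False
--
--         # check for numbers not being given to transformations that need them
--         elif i < len(transformation) - 1 and c in NUMERIC_TRANSFORMATIONS and not '0' <= transformation[i+1] <= '9':
--             return False
--         elif i == len(transformation) - 1 and c in NUMERIC_TRANSFORMATIONS:
--             return False
--     return True
-- ===== SOURCE B (Python) =====
-- def validate_transformation(transformation: str) -> bool:
--     """
--     Validates a transformation
--     :param transformation: The transformation string
--     :return: True or False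
--     """
--     s = transformation.strip()
--     chars_ok = all('0' <= c <= '9' or c in 'ITM' for c in s)
--     pairs_ok = all(
--         not (a == 'I' and '0' <= b <= '9')
--         and not (a in 'TM' and not ('0' <= b <= '9'))
--         for a, b in zip(s, s[1:])
--     )
--     last_ok = (not s) or s[-1] not in 'TM'
--     return chars_ok and pairs_ok and last_ok
-- ===== Notes on version B (the rewrite author's own statement) =====
-- stated objective: idiomatic
-- what changed: Replaced the indexed elif chain with early returns by three declarative all() passes: a character-set check, a zip-with-next adjacency check, and a last-character check.
import Mathlib
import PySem

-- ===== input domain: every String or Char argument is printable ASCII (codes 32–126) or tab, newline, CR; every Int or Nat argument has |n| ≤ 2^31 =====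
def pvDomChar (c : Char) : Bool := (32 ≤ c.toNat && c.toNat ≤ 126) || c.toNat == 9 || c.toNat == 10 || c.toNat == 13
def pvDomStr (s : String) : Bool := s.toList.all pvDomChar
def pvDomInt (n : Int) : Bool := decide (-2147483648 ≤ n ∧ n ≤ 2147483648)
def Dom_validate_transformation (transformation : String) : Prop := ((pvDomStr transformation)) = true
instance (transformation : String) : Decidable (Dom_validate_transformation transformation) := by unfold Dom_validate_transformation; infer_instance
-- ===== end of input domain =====

-- B replaces A's indexed elif chain with three declarative passes (character set, zip-with-next adjacency, last character); same O(n) cost, more idiomatic.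


-- ===== PORT A =====
-- Python's  '0' <= c <= '9'  on a character
def pvDigit (c : Char) : Bool := decide ('0' ≤ c) && decide (c ≤ '9')

-- the for-loop of A over enumerate(transformation): i is the current index, the second
-- list argument is the remaining characters; s is the whole stripped string (for s[i+1]).
-- The s[i+1] subscript is guarded by i < len(s) - 1, so pyGet? is some there; .elim false/true
-- applies the digit test to that guaranteed-present character.
def vt_loop (s : List Char) : Nat → List Char → Bool
  | _, [] => true
  | i, c :: rest =>
    if !(c == 'T' || c == 'M' || c == 'I') && !(pvDigit c) then false
    else if decide ((i : Int) < (s.length : Int) - 1) && (c == 'I') &&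
            ((PySem.List.pyGet? s ((i : Int) + 1)).elim false pvDigit) then false
    else if decide ((i : Int) < (s.length : Int) - 1) && (c == 'T' || c == 'M') &&
            !((PySem.List.pyGet? s ((i : Int) + 1)).elim true pvDigit) then false
    else if decide ((i : Int) = (s.length : Int) - 1) && (c == 'T' || c == 'M') then false
    else vt_loop s (i + 1) rest

def validate_transformation (transformation : String) : Bool :=
  let s := (PySem.Str.strip transformation).toList
  vt_loop s 0 s

-- ===== PORT B =====
-- '0' <= c <= '9' or c in 'ITM'
def pvCharOk (c : Char) : Bool := pvDigit c || (c == 'I' || c == 'T' || c == 'M')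
-- the per-pair condition inside B's second all(...)
def pvPairOk (p : Char × Char) : Bool :=
  !(p.1 == 'I' && pvDigit p.2) && !((p.1 == 'T' || p.1 == 'M') && !(pvDigit p.2))

def validate_transformation_alt (transformation : String) : Bool :=
  let s := (PySem.Str.strip transformation).toList
  let charsOk := s.all pvCharOk
  let pairsOk := (s.zip s.tail).all pvPairOk
  let lastOk := s.isEmpty || ((PySem.List.pyGet? s (-1)).elim true (fun c => !(c == 'T' || c == 'M')))
  charsOk && pairsOk && lastOk

-- ===== PRECONDITION & SPEC =====
def Spec_validate_transformation (transformation : String) (out : Bool) : Prop := out = validate_transformation_alt transformation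
instance (transformation : String) (out : Bool) : Decidable (Spec_validate_transformation transformation out) := by unfold Spec_validate_transformation; infer_instance

-- ===== CLAIM (what is proved, stated in full; the proofs are below) =====
def Claim_equal_validate_transformation : Prop := ∀ (transformation : String), Dom_validate_transformation transformation → Spec_validate_transformation transformation (validate_transformation transformation)

-- ===== LEMMAS AND PROOFS =====

lemma vt_loop_eq (rest : List Char) : ∀ (s : List Char) (i : Nat), s.drop i = rest →
    vt_loop s i rest =
      (rest.all pvCharOk && (rest.zip rest.tail).all pvPairOk &&
       (rest.getLast?.elim true (fun c => !(c == 'T' || c == 'M')))) := by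
  induction rest with
  | nil => intro s i h; simp [vt_loop]
  | cons c rest' ih =>
    intro s i h
    have hlen : (s.drop i).length = s.length - i := List.length_drop
    rw [h] at hlen
    have hi : i < s.length := by
      by_contra hc
      have : s.drop i = [] := List.drop_eq_nil_of_le (by omega)
      rw [h] at this; simp at this
    have hdrop : s.drop (i + 1) = rest' := by
      rw [← List.tail_drop, h]; rfl
    have hget : PySem.List.pyGet? s ((i : Int) + 1) = rest'[0]? := by
      have : ((i : Int) + 1) = ((i + 1 : Nat) : Int) := by push_cast; ring
      rw [this, PySem.List.pyGet?_natCast, ← hdrop, List.getElem?_drop]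
    cases rest' with
    | nil =>
      have hilen : (i : Int) = (s.length : Int) - 1 := by simp at hlen; omega
      rw [vt_loop]
      simp only [hilen]
      by_cases hT : c = 'T' <;> by_cases hM : c = 'M' <;> by_cases hI : c = 'I' <;>
        by_cases hd : pvDigit c = true <;>
        simp_all [pvCharOk]
    | cons d rest'' =>
      have hilen : ¬ ((i : Int) = (s.length : Int) - 1) ∧ ((i : Int) < (s.length : Int) - 1) := by
        simp at hlen; omega
      have hrec := ih s (i + 1) hdrop
      rw [vt_loop]
      simp only [hget, hilen.1, hilen.2, decide_true, decide_false]
      rw [hrec]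
      by_cases hT : c = 'T' <;> by_cases hM : c = 'M' <;> by_cases hI : c = 'I' <;>
        by_cases hd : pvDigit c = true <;> by_cases hdd : pvDigit d = true <;>
        simp_all [pvCharOk, pvPairOk, beq_eq_decide]

lemma last_eq (s : List Char) :
    (s.isEmpty || ((PySem.List.pyGet? s (-1)).elim true (fun c => !(c == 'T' || c == 'M'))))
      = (s.getLast?.elim true (fun c => !(c == 'T' || c == 'M'))) := by
  cases s with
  | nil => simp
  | cons a t => rw [PySem.List.pyGet?_neg_one]; simp

-- ===== VERDICT (by name: the statement is the Claim_ definition above) =====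
theorem validate_transformation_spec : Claim_equal_validate_transformation := by
  intro t _
  unfold Spec_validate_transformation
  have h1 : validate_transformation t
      = vt_loop ((PySem.Str.strip t).toList) 0 ((PySem.Str.strip t).toList) := rfl
  have h2 : validate_transformation_alt t
      = (((PySem.Str.strip t).toList).all pvCharOk &&
         (((PySem.Str.strip t).toList).zip ((PySem.Str.strip t).toList).tail).all pvPairOk &&
         (((PySem.Str.strip t).toList).isEmpty ||
           ((PySem.List.pyGet? ((PySem.Str.strip t).toList) (-1)).elim true
             (fun c => !(c == 'T' || c == 'M'))))) := rfl
  rw [h1, h2, vt_loop_eq ((PySem.Str.strip t).toList) ((PySem.Str.strip t).toList) 0 List.drop_zero, last_eq]
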